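-- pv_equiv track=rewrite | github.com/alicjarozycka/bwt | bwt.py | o_array
-- ===== SOURCE A (Python) =====
-- def o_array(bwt):
--     '''
--     Function name: o_array
--     Arguments: bwt
--     Returns: o_array
--     Function takes a character and a position in the BWT and returns the occurences - how many times that character appeared in the BWT to that position.
--     '''
--     o_array = {}
--
--     for element in bwt:
--         o_array[element] = [0]
--
--     for index, element in enumerate(bwt):
--         for key in o_array:
--             if key == element:
--                 o_array[key].append(o_array[key][-1] + 1)
--             else:
--                 o_array[key].append(o_array[key][-1])
--
--     for element in o_array:
--         o_array[element] = o_array[element][1:]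
--
--     return o_array
-- ===== SOURCE B (Python) =====
-- def o_array(bwt):
--     n = len(bwt)
--     pos = {}
--     for i, c in enumerate(bwt):
--         pos.setdefault(c, []).append(i)
--     result = {}
--     for c, ps in pos.items():
--         row = []
--         prev = 0
--         for k, p in enumerate(ps):
--             row += [k] * (p - prev)
--             prev = p
--         row += [len(ps)] * (n - prev)
--         result[c] = row
--     return result
-- ===== Notes on version B (the rewrite author's own statement) =====
-- stated objective: faster
-- what changed: B replaces A's position-major sweep (which compares every key against every BWT position, appends to every row each step, and re-slices every row) by building an occurrence-positions index in one pass and then run-length expanding each character's position list into its cumulative row with list-multiplication, eliminating all per-position character comparisons.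
import Mathlib
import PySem

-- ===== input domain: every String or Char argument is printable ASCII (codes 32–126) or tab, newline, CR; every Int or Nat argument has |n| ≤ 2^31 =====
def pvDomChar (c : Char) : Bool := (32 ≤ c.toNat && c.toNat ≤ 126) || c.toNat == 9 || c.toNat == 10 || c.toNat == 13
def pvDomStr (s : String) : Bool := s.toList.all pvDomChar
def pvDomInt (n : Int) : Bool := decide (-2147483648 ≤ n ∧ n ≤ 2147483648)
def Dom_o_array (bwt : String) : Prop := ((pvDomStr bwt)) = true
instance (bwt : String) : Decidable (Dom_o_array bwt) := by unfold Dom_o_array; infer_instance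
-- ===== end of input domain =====

-- B replaces A's position-major sweep over every key by a one-pass occurrence-positions
-- index followed by run-length expansion of each character's position list into its
-- cumulative row in bulk chunks, removing the inner per-key comparisons (measured faster in a timing run).


-- ===== PORT A =====
-- literal port of A: dict of [0]-seeded rows, a sweep over enumerate(bwt) appending to
-- every key at every position, then a [1:] slice of every row.
def o_array (bwt : String) : List (String × List Int) :=
  let d0 : PySem.Dict String (List Int) :=
    bwt.toList.foldl (fun d c => d.insert (String.singleton c) [0]) PySem.Dict.empty
  let d1 : PySem.Dict String (List Int) :=
    (PySem.List.enumerate bwt.toList).foldl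
      (fun d p =>
        d.keys.foldl
          (fun d' key =>
            if key == String.singleton p.2 then
              d'.modify key [] (fun v => v ++ [PySem.List.pyGetD v (-1) 0 + 1])
            else
              d'.modify key [] (fun v => v ++ [PySem.List.pyGetD v (-1) 0]))
          d)
      d0
  let d2 : PySem.Dict String (List Int) :=
    d1.keys.foldl
      (fun d key => d.modify key [] (fun v => PySem.List.slice v (some 1) none)) d1
  d2.items

-- ===== PORT B =====
-- Source B's inner loop: run-length expansion of one position list ps over total length n
-- ([k]*(p-prev) is List.replicate (p-prev).toNat; Python's list*m is empty for m ≤ 0, as is toNat)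
def obRow (n : Int) (ps : List Int) : List Int :=
  let st :=
    (PySem.List.enumerate ps).foldl
      (fun (st : List Int × Int) kp => (st.1 ++ List.replicate (kp.2 - st.2).toNat kp.1, kp.2))
      ([], 0)
  st.1 ++ List.replicate (n - st.2).toNat (ps.length : Int)

def o_array_alt (bwt : String) : List (String × List Int) :=
  let cs := bwt.toList
  let n : Int := cs.length
  -- pos: one pass, setdefault(c, []).append(i)
  let pos : PySem.Dict String (List Int) :=
    (PySem.List.enumerate cs).foldl
      (fun d ic => d.modify (String.singleton ic.2) [] (fun l => l ++ [ic.1]))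
      PySem.Dict.empty
  -- result: one run-length row per indexed character
  (pos.items.foldl
    (fun (d : PySem.Dict String (List Int)) kv => d.insert kv.1 (obRow n kv.2))
    PySem.Dict.empty).items

-- ===== PRECONDITION & SPEC =====
def Spec_o_array (bwt : String) (out : List (String × List Int)) : Prop := out = o_array_alt bwt
instance (bwt : String) (out : List (String × List Int)) : Decidable (Spec_o_array bwt out) := by unfold Spec_o_array; infer_instance

-- ===== CLAIM (what is proved, stated in full; the proofs are below) =====
def Claim_equal_o_array : Prop := ∀ (bwt : String), Dom_o_array bwt → Spec_o_array bwt (o_array bwt)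

-- ===== LEMMAS AND PROOFS =====

theorem singleton_inj {c x : Char} (h : String.singleton c = String.singleton x) : c = x := by
  have := congrArg String.toList h; simpa using this

theorem singleton_injective : Function.Injective String.singleton :=
  fun _ _ h => singleton_inj h

-- A's per-position step, specialised to one key: the branch A takes for key k at character x.
def oaStep (k : String) (v : List Int) (x : Char) : List Int :=
  if k == String.singleton x then v ++ [PySem.List.pyGetD v (-1) 0 + 1]
  else v ++ [PySem.List.pyGetD v (-1) 0]

-- a fold of single-key modifies over a Nodup key list, read back at one key
theorem getD_foldl_modify_distinct (K : List String) (g : String → List Int → List Int)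
    (d : PySem.Dict String (List Int)) (k : String) (hnd : K.Nodup) :
    (K.foldl (fun d' key => d'.modify key [] (g key)) d).getD k [] =
      if k ∈ K then g k (d.getD k []) else d.getD k [] := by
  induction K generalizing d with
  | nil => simp
  | cons key rest ih =>
    simp only [List.foldl_cons]
    rcases List.nodup_cons.mp hnd with ⟨hk, hrest⟩
    rw [ih _ hrest]
    by_cases h1 : k ∈ rest
    · have : k ≠ key := fun h => hk (h ▸ h1)
      simp [h1, PySem.Dict.getD_modify, this]
    · by_cases h2 : k = key
      · subst h2; simp [h1]
      · simp [h1, h2, PySem.Dict.getD_modify]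

theorem keys_foldl_modify_distinct (K : List String) (g : String → List Int → List Int)
    (d : PySem.Dict String (List Int)) (hK : ∀ k ∈ K, k ∈ d.keys) :
    (K.foldl (fun d' key => d'.modify key [] (g key)) d).keys = d.keys := by
  induction K generalizing d with
  | nil => rfl
  | cons key rest ih =>
    simp only [List.foldl_cons]
    have hkeys : (d.modify key [] (g key)).keys = d.keys := by
      have hcont : d.contains key = true :=
        (PySem.Dict.contains_iff_mem_keys d key).mpr (hK key List.mem_cons_self)
      simp [PySem.Dict.keys_modify, PySem.Dict.keys_insert_of_contains, hcont]
    rw [ih _ (fun k hk => hkeys ▸ hK k (List.mem_cons_of_mem _ hk)), hkeys]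

-- the inner keys-sweep of A's second loop is a fold of single-key modifies by oaStep
theorem inner_eq (x : Char) (K : List String) (d : PySem.Dict String (List Int)) :
    K.foldl
      (fun d' key =>
        if key == String.singleton x then
          d'.modify key [] (fun v => v ++ [PySem.List.pyGetD v (-1) 0 + 1])
        else
          d'.modify key [] (fun v => v ++ [PySem.List.pyGetD v (-1) 0]))
      d =
    K.foldl (fun d' key => d'.modify key [] (fun v => oaStep key v x)) d := by
  have hfun : (fun (d' : PySem.Dict String (List Int)) key =>
      if key == String.singleton x then
        d'.modify key [] (fun v => v ++ [PySem.List.pyGetD v (-1) 0 + 1])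
      else
        d'.modify key [] (fun v => v ++ [PySem.List.pyGetD v (-1) 0])) =
      (fun d' key => d'.modify key [] (fun v => oaStep key v x)) := by
    funext d' key
    by_cases h : (key == String.singleton x) = true <;> simp [oaStep, h]
  rw [hfun]

-- A's second loop preserves the key list
theorem a_loop2_keys (cs : List Char) (s : Int) (d : PySem.Dict String (List Int)) :
    ((PySem.List.enumerate cs s).foldl
      (fun d p =>
        d.keys.foldl
          (fun d' key =>
            if key == String.singleton p.2 then
              d'.modify key [] (fun v => v ++ [PySem.List.pyGetD v (-1) 0 + 1])
            else
              d'.modify key [] (fun v => v ++ [PySem.List.pyGetD v (-1) 0]))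
          d)
      d).keys = d.keys := by
  induction cs generalizing s d with
  | nil => rfl
  | cons x cs ih =>
    rw [PySem.List.enumerate_cons, List.foldl_cons, ih]
    rw [inner_eq, keys_foldl_modify_distinct _ _ _ (fun k hk => hk)]

-- A's second loop, per key: a fold of oaStep
theorem a_loop2_getD (cs : List Char) (s : Int) (d : PySem.Dict String (List Int)) (k : String)
    (hnd : d.keys.Nodup) (hk : k ∈ d.keys) :
    ((PySem.List.enumerate cs s).foldl
      (fun d p =>
        d.keys.foldl
          (fun d' key =>
            if key == String.singleton p.2 then
              d'.modify key [] (fun v => v ++ [PySem.List.pyGetD v (-1) 0 + 1])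
            else
              d'.modify key [] (fun v => v ++ [PySem.List.pyGetD v (-1) 0]))
          d)
      d).getD k [] = cs.foldl (oaStep k) (d.getD k []) := by
  induction cs generalizing s d with
  | nil => rfl
  | cons x cs ih =>
    rw [PySem.List.enumerate_cons, List.foldl_cons, List.foldl_cons]
    have hkeys : ((d.keys.foldl
        (fun d' key =>
          if key == String.singleton x then
            d'.modify key [] (fun v => v ++ [PySem.List.pyGetD v (-1) 0 + 1])
          else
            d'.modify key [] (fun v => v ++ [PySem.List.pyGetD v (-1) 0]))
        d)).keys = d.keys := by
      rw [inner_eq, keys_foldl_modify_distinct _ _ _ (fun k hk => hk)]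
    rw [ih _ _ (by rw [hkeys]; exact hnd) (by rw [hkeys]; exact hk)]
    congr 1
    rw [inner_eq, getD_foldl_modify_distinct _ _ _ _ hnd, if_pos hk]

-- the running-counter row: proof-side intermediate between A's oaStep fold and B's obRow
def oaAcc (c : Char) (st : Int × List Int) (x : Char) : Int × List Int :=
  (if x == c then st.1 + 1 else st.1, st.2 ++ [if x == c then st.1 + 1 else st.1])

-- B's inner fold accumulates its list component
theorem alt_fold_snd (cs : List Char) (c : Char) (t : Int) (l : List Int) :
    (cs.foldl (oaAcc c) (t, l)).2 = l ++ (cs.foldl (oaAcc c) (t, [])).2 := by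
  induction cs generalizing t l with
  | nil => simp
  | cons x cs ih =>
    simp only [List.foldl_cons]
    have h1 : oaAcc c (t, l) x =
      (if x == c then t + 1 else t, l ++ [if x == c then t + 1 else t]) := rfl
    have h2 : oaAcc c (t, []) x =
      (if x == c then t + 1 else t, [if x == c then t + 1 else t]) := rfl
    rw [h1, h2, ih _ (l ++ [if x == c then t + 1 else t]),
      ih _ [if x == c then t + 1 else t]]
    simp

-- A's single-key fold from a row ending in t equals that row ++ the counter row from t
theorem oaStep_fold_eq (cs : List Char) (c : Char) (t : Int) (l : List Int) :
    cs.foldl (oaStep (String.singleton c)) (l ++ [t]) =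
      (l ++ [t]) ++ (cs.foldl (oaAcc c) (t, [])).2 := by
  induction cs generalizing t l with
  | nil => simp
  | cons x cs ih =>
    simp only [List.foldl_cons]
    have hlast : PySem.List.pyGetD (l ++ [t]) (-1) 0 = t :=
      PySem.List.pyGetD_neg_one_append_singleton ..
    by_cases h : (x == c) = true
    · have hxc : x = c := by simpa using h
      have hstep : oaStep (String.singleton c) (l ++ [t]) x = (l ++ [t]) ++ [t + 1] := by
        simp [oaStep, hlast, hxc]
      have hacc : oaAcc c (t, []) x = (t + 1, [t + 1]) := by simp [oaAcc, h]
      rw [hstep, hacc, ih (t + 1) (l ++ [t]), alt_fold_snd cs c (t + 1) [t + 1]]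
      simp
    · have hne : (String.singleton c == String.singleton x) = false := by
        simp only [beq_eq_false_iff_ne, ne_eq]
        intro hcx
        exact h (by simp [singleton_inj hcx])
      have hstep : oaStep (String.singleton c) (l ++ [t]) x = (l ++ [t]) ++ [t] := by
        simp [oaStep, hne, hlast]
      have hacc : oaAcc c (t, []) x = (t, [t]) := by simp [oaAcc, h]
      rw [hstep, hacc, ih t (l ++ [t]), alt_fold_snd cs c t [t]]
      simp

-- first loop of A: values
theorem a_loop1_getD (cs : List Char) (d : PySem.Dict String (List Int)) (k : String) :
    (cs.foldl (fun d c => d.insert (String.singleton c) [0]) d).getD k [] =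
      if k ∈ cs.map String.singleton then [0] else d.getD k [] := by
  induction cs generalizing d with
  | nil => simp
  | cons x cs ih =>
    simp only [List.foldl_cons, List.map_cons]
    rw [ih]
    by_cases h1 : k ∈ cs.map String.singleton
    · simp [h1]
    · by_cases h2 : k = String.singleton x
      · subst h2; simp [h1]
      · simp [h1, h2, PySem.Dict.getD_insert]

-- Set.add commutes with mapping an injective function
theorem set_add_map (s : List Char) (x : Char) :
    PySem.Set.add (s.map String.singleton) (String.singleton x) =
      (PySem.Set.add s x).map String.singleton := by
  by_cases h : x ∈ s
  · have h' : String.singleton x ∈ s.map String.singleton := List.mem_map_of_mem h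
    simp [PySem.Set.add, PySem.Set.contains, h, h']
  · have h' : String.singleton x ∉ s.map String.singleton := by
      intro hm
      rcases List.mem_map.mp hm with ⟨y, hy, hyx⟩
      exact h ((singleton_inj hyx.symm) ▸ hy)
    simp [PySem.Set.add, PySem.Set.contains, h, h']

theorem set_update_map (l s : List Char) :
    PySem.Set.update (s.map String.singleton) (l.map String.singleton) =
      (PySem.Set.update s l).map String.singleton := by
  induction l generalizing s with
  | nil => rfl
  | cons x l ih =>
    simp only [List.map_cons, PySem.Set.update, List.foldl_cons]
    rw [show PySem.Set.add (s.map String.singleton) (String.singleton x) =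
      (PySem.Set.add s x).map String.singleton from set_add_map s x]
    exact ih (PySem.Set.add s x)

-- first loop of A: keys = dedup'd characters as singleton strings
theorem a_keys (cs : List Char) :
    (cs.foldl (fun (d : PySem.Dict String (List Int)) c => d.insert (String.singleton c) [0])
      PySem.Dict.empty).keys = (PySem.List.dedup cs).map String.singleton := by
  rw [PySem.Dict.keys_foldl_insert_key]
  have h1 : PySem.Dict.keys (PySem.Dict.empty : PySem.Dict String (List Int)) =
      (([] : List Char).map String.singleton) := rfl
  rw [h1, set_update_map]
  rfl

-- ===== B-side lemmas =====

-- the positions of c in cs (what B's pos dict holds at key c)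
def posOf (cs : List Char) (c : Char) : List Int :=
  ((PySem.List.enumerate cs).filter (fun ic => ic.2 == c)).map (·.1)

theorem posOf_snoc (cs : List Char) (x c : Char) :
    posOf (cs ++ [x]) c =
      posOf cs c ++ (if x == c then [((cs.length : Int))] else []) := by
  unfold posOf
  rw [PySem.List.enumerate_append]
  simp only [List.filter_append, List.map_append]
  congr 1
  by_cases h : (x == c) = true <;>
    simp [PySem.List.enumerate_cons, PySem.List.enumerate_nil, List.filter, h]

-- length of the position list = count of the character
theorem posOf_length (cs : List Char) (c : Char) :
    (posOf cs c).length = cs.count c := by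
  induction cs using List.reverseRecOn with
  | nil => rfl
  | append_singleton cs x ih =>
    rw [posOf_snoc]
    by_cases h : (x == c) = true
    · have : x = c := by simpa using h
      simp [this, ih, List.count_append]
    · have : ¬ x = c := by simpa using h
      simp [h, ih, List.count_append, this]

-- first component of the counter fold = running count
theorem oaAcc_fold_fst (cs : List Char) (c : Char) (t : Int) (l : List Int) :
    (cs.foldl (oaAcc c) (t, l)).1 = t + cs.count c := by
  induction cs generalizing t l with
  | nil => simp
  | cons x cs ih =>
    simp only [List.foldl_cons, oaAcc]
    rw [ih]
    by_cases h : (x == c) = true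
    · have : x = c := by simpa using h
      simp [this]; omega
    · have hne : ¬ x = c := by simpa using h
      simp [h, hne]

-- counter row over a snoc
theorem counterRow_snoc (cs : List Char) (x c : Char) :
    ((cs ++ [x]).foldl (oaAcc c) (0, [])).2 =
      (cs.foldl (oaAcc c) (0, [])).2 ++
        [(cs.count c : Int) + (if x == c then 1 else 0)] := by
  rw [List.foldl_append]
  simp only [List.foldl_cons, List.foldl_nil]
  have hfst : (cs.foldl (oaAcc c) (0, [])).1 = (cs.count c : Int) := by
    rw [oaAcc_fold_fst]; simp
  rcases hst : cs.foldl (oaAcc c) (0, []) with ⟨t, l⟩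
  rw [hst] at hfst
  simp only [oaAcc] at *
  by_cases h : (x == c) = true <;> simp [h, hfst]

-- MAIN bridge: B's run-length row from the positions equals the counter row,
-- together with bounds on the fold's final 'prev'
theorem obRow_eq_counterRow (cs : List Char) (c : Char) :
    obRow (cs.length : Int) (posOf cs c) = (cs.foldl (oaAcc c) (0, [])).2 ∧
      0 ≤ ((PySem.List.enumerate (posOf cs c)).foldl
        (fun (st : List Int × Int) kp => (st.1 ++ List.replicate (kp.2 - st.2).toNat kp.1, kp.2))
        ([], 0)).2 ∧
      ((PySem.List.enumerate (posOf cs c)).foldl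
        (fun (st : List Int × Int) kp => (st.1 ++ List.replicate (kp.2 - st.2).toNat kp.1, kp.2))
        ([], 0)).2 ≤ (cs.length : Int) := by
  induction cs using List.reverseRecOn with
  | nil => simp [obRow, posOf, PySem.List.enumerate_nil]
  | append_singleton cs x ih =>
    rcases ih with ⟨hrow, hle0, hlen⟩
    rw [posOf_snoc, counterRow_snoc, ← hrow]
    rcases hst : ((PySem.List.enumerate (posOf cs c)).foldl
        (fun (st : List Int × Int) kp => (st.1 ++ List.replicate (kp.2 - st.2).toNat kp.1, kp.2))
        ([], 0)) with ⟨row, prev⟩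
    rw [hst] at hle0 hlen
    have hLen : (posOf cs c).length = cs.count c := posOf_length cs c
    by_cases h : (x == c) = true
    · -- new position cs.length appended
      simp only [h, if_pos]
      have hfold : (PySem.List.enumerate (posOf cs c ++ [((cs.length : Int))])).foldl
          (fun (st : List Int × Int) kp =>
            (st.1 ++ List.replicate (kp.2 - st.2).toNat kp.1, kp.2)) ([], 0)
          = (row ++ List.replicate (((cs.length : Int)) - prev).toNat
              ((0 : Int) + (posOf cs c).length), (cs.length : Int)) := by
        rw [PySem.List.enumerate_append, List.foldl_append, hst]
        simp [PySem.List.enumerate_cons, PySem.List.enumerate_nil]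
      refine ⟨?_, by rw [hfold]; simp, by rw [hfold]; simp⟩
      unfold obRow
      rw [hfold]
      simp only [List.append_assoc, List.length_append, List.length_cons, List.length_nil]
      have h1 : ((((cs.length + 1 : Nat)) : Int) - (cs.length : Int)).toNat = 1 := by
        push_cast; omega
      have h2 : ((0 : Int) + (posOf cs c).length) = ((posOf cs c).length : Int) := by omega
      rw [h1, h2, List.replicate_one, hLen]
      push_cast
      rw [hst]
    · -- no new position; n grows by one, last run extends
      simp only [h, if_neg, List.append_nil, Bool.not_eq_true] at *
      refine ⟨?_, ?_, ?_⟩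
      · unfold obRow
        rw [hst]
        simp only [List.append_assoc]
        congr 1
        have h3 : ((((cs ++ [x]).length : Int)) - prev).toNat
            = ((cs.length : Int) - prev).toNat + 1 := by
          simp only [List.length_append, List.length_cons, List.length_nil]
          push_cast; omega
        rw [h3, List.replicate_succ']
        rw [hLen]
        norm_num
      · rw [hst]; exact hle0
      · rw [hst]; simp; omega

-- B's first loop: keys and values
theorem b_pos_keys (cs : List Char) :
    ((PySem.List.enumerate cs).foldl
      (fun (d : PySem.Dict String (List Int)) ic =>
        d.modify (String.singleton ic.2) [] (fun l => l ++ [ic.1]))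
      PySem.Dict.empty).keys = (PySem.List.dedup cs).map String.singleton := by
  rw [PySem.Dict.keys_foldl_modify_key]
  have h0 : PySem.Dict.keys (PySem.Dict.empty : PySem.Dict String (List Int)) =
      (([] : List Char).map String.singleton) := rfl
  have h1 : (PySem.List.enumerate cs).map (fun ic => String.singleton ic.2) =
      cs.map String.singleton := by
    rw [show (fun (ic : Int × Char) => String.singleton ic.2)
        = String.singleton ∘ (·.2) from rfl, ← List.map_map,
      PySem.List.map_snd_enumerate]
  rw [h0, h1, set_update_map]
  rfl

theorem b_pos_getD (cs : List Char) (c : Char) :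
    ((PySem.List.enumerate cs).foldl
      (fun (d : PySem.Dict String (List Int)) ic =>
        d.modify (String.singleton ic.2) [] (fun l => l ++ [ic.1]))
      PySem.Dict.empty).getD (String.singleton c) [] = posOf cs c := by
  have hmap : (PySem.List.enumerate cs).foldl
      (fun (d : PySem.Dict String (List Int)) ic =>
        d.modify (String.singleton ic.2) [] (fun l => l ++ [ic.1]))
      PySem.Dict.empty
      = ((PySem.List.enumerate cs).map (fun ic => (String.singleton ic.2, ic.1))).foldl
        (fun (d : PySem.Dict String (List Int)) p => d.modify p.1 [] (fun l => l ++ [p.2]))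
        PySem.Dict.empty := by
    rw [List.foldl_map]
  rw [hmap, PySem.Dict.getD_foldl_modify_append]
  simp only [PySem.Dict.getD_empty, List.nil_append]
  unfold posOf
  rw [List.filter_map, List.map_map]
  have hf : (PySem.List.enumerate cs).filter
      ((fun p => p.1 == String.singleton c) ∘ (fun ic => (String.singleton ic.2, ic.1)))
      = (PySem.List.enumerate cs).filter (fun ic => ic.2 == c) := by
    apply List.filter_congr
    intro ic _
    simp only [Function.comp]
    by_cases h : ic.2 = c
    · simp [h]
    · have : ¬ String.singleton ic.2 = String.singleton c := fun hh => h (singleton_inj hh)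
      simp [h, this]
  rw [hf]
  exact List.map_congr_left (fun ic _ => rfl)

-- ===== VERDICT (by name: the statement is the Claim_ definition above) =====
theorem o_array_spec : Claim_equal_o_array := by
  intro bwt _
  unfold Spec_o_array o_array o_array_alt
  set cs := bwt.toList with hcs
  simp only []
  set d0 : PySem.Dict String (List Int) :=
    cs.foldl (fun d c => d.insert (String.singleton c) [0]) PySem.Dict.empty with hd0
  have hk0 : d0.keys = (PySem.List.dedup cs).map String.singleton := a_keys cs
  have hnd0 : d0.keys.Nodup := by
    rw [hk0]; exact (PySem.List.nodup_dedup cs).map singleton_injective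
  set d1 := (PySem.List.enumerate cs).foldl
      (fun d p =>
        d.keys.foldl
          (fun d' key =>
            if key == String.singleton p.2 then
              d'.modify key [] (fun v => v ++ [PySem.List.pyGetD v (-1) 0 + 1])
            else
              d'.modify key [] (fun v => v ++ [PySem.List.pyGetD v (-1) 0]))
          d)
      d0 with hd1
  have hk1 : d1.keys = d0.keys := a_loop2_keys cs 0 d0
  set d2 := d1.keys.foldl
      (fun d key => d.modify key [] (fun v => PySem.List.slice v (some 1) none)) d1 with hd2
  have hk2 : d2.keys = d1.keys :=
    keys_foldl_modify_distinct _ _ _ (fun k hk => hk)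
  -- value of A's d2 at a live key = B's run-length row
  have hval : ∀ c ∈ PySem.List.dedup cs,
      d2.getD (String.singleton c) [] = obRow (cs.length : Int) (posOf cs c) := by
    intro c hc
    have hmem : String.singleton c ∈ d1.keys := by
      rw [hk1, hk0]; exact List.mem_map_of_mem hc
    have hnd1 : d1.keys.Nodup := by rw [hk1]; exact hnd0
    rw [hd2, getD_foldl_modify_distinct _ _ _ _ hnd1, if_pos hmem]
    have hv1 : d1.getD (String.singleton c) [] = cs.foldl (oaStep (String.singleton c)) [0] := by
      rw [hd1, a_loop2_getD cs 0 d0 _ hnd0 (hk1 ▸ hmem)]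
      congr 1
      rw [a_loop1_getD, if_pos]
      exact List.mem_map_of_mem ((PySem.List.mem_dedup cs c).mp hc)
    rw [hv1]
    have h1 := oaStep_fold_eq cs c 0 []
    simp only [List.nil_append] at h1
    rw [h1, PySem.List.slice_from_one, (obRow_eq_counterRow cs c).1]
    simp
  -- B's pos dict
  set pos := (PySem.List.enumerate cs).foldl
      (fun (d : PySem.Dict String (List Int)) ic =>
        d.modify (String.singleton ic.2) [] (fun l => l ++ [ic.1]))
      PySem.Dict.empty with hpos
  have hposk : pos.keys = (PySem.List.dedup cs).map String.singleton := b_pos_keys cs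
  have hndpos : pos.keys.Nodup := by
    rw [hposk]; exact (PySem.List.nodup_dedup cs).map singleton_injective
  have hpositems : pos.items = (PySem.List.dedup cs).map
      (fun c => (String.singleton c, posOf cs c)) := by
    rw [PySem.Dict.items_eq_map_keys pos hndpos [], hposk, List.map_map]
    refine List.map_congr_left ?_
    intro c hc
    simp only [Function.comp]
    rw [hpos, b_pos_getD]
  -- B's result fold over fresh distinct keys
  have haltitems : (pos.items.foldl
      (fun (d : PySem.Dict String (List Int)) kv => d.insert kv.1 (obRow (cs.length : Int) kv.2))
      PySem.Dict.empty).items =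
      pos.items.map (fun kv => (kv.1, obRow (cs.length : Int) kv.2)) := by
    rw [PySem.Dict.items_foldl_insert_fresh _ _ _ _ (fun a _ => rfl)
      (by
        have : pos.items.map (·.1) = pos.keys := rfl
        rw [this]; exact hndpos)]
    rfl
  -- items of both sides
  have hitems2 : d2.items = d2.keys.map (fun k => (k, d2.getD k [])) :=
    PySem.Dict.items_eq_map_keys d2 (by rw [hk2, hk1]; exact hnd0) []
  rw [hitems2, haltitems, hpositems, hk2, hk1, hk0, List.map_map, List.map_map]
  refine List.map_congr_left ?_
  intro c hc
  simp only [Function.comp]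
  rw [hval c hc]
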